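-- pv_equiv track=rewrite | github.com/jassler/dailycodingproblems | problem_004/jassler.py | find_int_sorted
-- ===== SOURCE A (Python) =====
-- def find_int_sorted(input: list):
--     inp = sorted(input)
--     prev = inp[0]
--     for n in inp[1:]:
--         if n - 1 > prev and prev > 0:
--             return prev + 1
--         prev = n
--     return prev + 1
-- ===== SOURCE B (Python) =====
-- def find_int_sorted(input: list):
--     s = set(input)
--     mx = max(input)
--     cands = [a + 1 for a in s if a > 0 and a < mx and a + 1 not in s]
--     return min(cands) if cands else mx + 1
-- ===== Notes on version B (the rewrite author's own statement) =====
-- stated objective: alternative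
-- what changed: Replaces sort-then-adjacent-scan with a single hash-set pass: collect a+1 for each positive element a below the max whose successor is absent from the set, return the minimum of those, else max+1.
import Mathlib
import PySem

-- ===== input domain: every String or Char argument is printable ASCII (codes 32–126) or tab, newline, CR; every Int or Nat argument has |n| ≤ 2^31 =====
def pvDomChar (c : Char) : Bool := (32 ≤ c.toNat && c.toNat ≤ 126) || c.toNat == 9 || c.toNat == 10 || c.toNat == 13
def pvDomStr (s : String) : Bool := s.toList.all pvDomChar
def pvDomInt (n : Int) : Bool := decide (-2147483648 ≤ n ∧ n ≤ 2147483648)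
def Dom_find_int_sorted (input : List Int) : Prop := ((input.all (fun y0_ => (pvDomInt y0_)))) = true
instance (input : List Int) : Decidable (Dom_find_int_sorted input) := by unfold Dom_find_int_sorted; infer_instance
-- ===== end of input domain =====

-- B replaces A's sort + adjacent-pair scan by a hash-set pass (alternative algorithm, same result).

-- ===== PORT A =====
-- the 'for n in inp[1:]' loop with early return; prev is the running state
def findLoopA (prev : Int) : List Int → Int
  | [] => prev + 1
  | n :: t => if n - 1 > prev ∧ prev > 0 then prev + 1 else findLoopA n t

def find_int_sorted (input : List Int) : Int :=
  let inp := PySem.List.sorted input (fun x => x) false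
  match inp with
  | [] => 0  -- inp[0] raises IndexError on empty input; excluded by Pre_
  | prev :: rest => findLoopA prev rest

-- ===== PORT B =====
def find_int_sorted_alt (input : List Int) : Int :=
  let s := PySem.Set.ofList input
  match PySem.List.max? input (fun x => x) with
  | none => 0  -- max() raises ValueError on empty input; excluded by Pre_
  | some mx =>
    let cands := (s.filter (fun a => decide (a > 0) && decide (a < mx) && !(PySem.Set.contains s (a + 1)))).map (fun a => a + 1)
    match PySem.List.min? cands (fun x => x) with
    | some m => m
    | none => mx + 1

-- ===== PRECONDITION & SPEC =====
-- A raises IndexError (and B ValueError) on the empty list; Pre_ excludes exactly it.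
def Pre_find_int_sorted (input : List Int) : Prop := input ≠ []
instance (input : List Int) : Decidable (Pre_find_int_sorted input) := by unfold Pre_find_int_sorted; infer_instance
def pvWitness_find_int_sorted : List Int := [1]

def Spec_find_int_sorted (input : List Int) (out : Int) : Prop := out = find_int_sorted_alt input
instance (input : List Int) (out : Int) : Decidable (Spec_find_int_sorted input out) := by unfold Spec_find_int_sorted; infer_instance

-- ===== CLAIM (what is proved, stated in full; the proofs are below) =====
def Claim_equal_find_int_sorted : Prop := ∀ (input : List Int), Dom_find_int_sorted input → Pre_find_int_sorted input → Spec_find_int_sorted input (find_int_sorted input)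

-- ===== LEMMAS AND PROOFS =====

-- a is a "gap candidate" of xs: positive, in xs, below some element of xs, successor absent
def Cand (xs : List Int) (a : Int) : Prop :=
  a ∈ xs ∧ 0 < a ∧ (∃ y ∈ xs, a < y) ∧ a + 1 ∉ xs

-- the common specification both programs satisfy (membership-only, hence order-free)
def Bspec (xs : List Int) (r : Int) : Prop :=
  (∃ a, Cand xs a ∧ r = a + 1 ∧ ∀ b, Cand xs b → a ≤ b) ∨
  ((∀ a, ¬ Cand xs a) ∧ ∃ m, m ∈ xs ∧ (∀ y ∈ xs, y ≤ m) ∧ r = m + 1)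

theorem Bspec_unique {xs : List Int} {r r' : Int} (h : Bspec xs r) (h' : Bspec xs r') : r = r' := by
  rcases h with ⟨a, ha, hr, hmin⟩ | ⟨hnone, m, hm, hmax, hr⟩
  · rcases h' with ⟨a', ha', hr', hmin'⟩ | ⟨hnone', _⟩
    · have := hmin a' ha'; have := hmin' a ha; omega
    · exact absurd ha (hnone' a)
  · rcases h' with ⟨a', ha', _, _⟩ | ⟨_, m', hm', hmax', hr'⟩
    · exact absurd ha' (hnone a')
    · have := hmax m' hm'; have := hmax' m hm; omega

theorem Bspec_congr {xs ys : List Int} {r : Int} (hmem : ∀ x, x ∈ xs ↔ x ∈ ys)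
    (h : Bspec xs r) : Bspec ys r := by
  have hc : ∀ a, Cand xs a ↔ Cand ys a := by
    intro a
    unfold Cand
    constructor
    · rintro ⟨h1, h2, ⟨y, hy, hy2⟩, h4⟩
      exact ⟨(hmem a).1 h1, h2, ⟨y, (hmem y).1 hy, hy2⟩, fun hx => h4 ((hmem _).2 hx)⟩
    · rintro ⟨h1, h2, ⟨y, hy, hy2⟩, h4⟩
      exact ⟨(hmem a).2 h1, h2, ⟨y, (hmem y).2 hy, hy2⟩, fun hx => h4 ((hmem _).1 hx)⟩
  rcases h with ⟨a, ha, hr, hmin⟩ | ⟨hnone, m, hm, hmax, hr⟩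
  · exact Or.inl ⟨a, (hc a).1 ha, hr, fun b hb => hmin b ((hc b).2 hb)⟩
  · exact Or.inr ⟨fun a ha => hnone a ((hc a).2 ha),
      m, (hmem m).1 hm, fun y hy => hmax y ((hmem y).2 hy), hr⟩

-- A's loop on a sorted list satisfies Bspec
theorem loopA_spec : ∀ (rest : List Int) (p : Int),
    (p :: rest).Pairwise (· ≤ ·) → Bspec (p :: rest) (findLoopA p rest) := by
  intro rest
  induction rest with
  | nil =>
    intro p _
    refine Or.inr ⟨?_, p, List.mem_singleton_self p, ?_, rfl⟩
    · rintro a ⟨ha, _, ⟨y, hy, hlt⟩, _⟩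
      simp only [List.mem_singleton] at ha hy; omega
    · intro y hy; simp only [List.mem_singleton] at hy; omega
  | cons n t ih =>
    intro p hpw
    have hpn : p ≤ n := (List.pairwise_cons.1 hpw).1 n (List.mem_cons_self)
    have hpt : ∀ y ∈ t, p ≤ y := fun y hy => (List.pairwise_cons.1 hpw).1 y (List.mem_cons_of_mem _ hy)
    have hnt : ∀ y ∈ t, n ≤ y := fun y hy => (List.pairwise_cons.1 (List.pairwise_cons.1 hpw).2).1 y hy
    have hall : ∀ y ∈ p :: n :: t, p ≤ y := by
      intro y hy
      rcases List.mem_cons.1 hy with rfl | hy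
      · exact le_refl _
      · rcases List.mem_cons.1 hy with rfl | hy
        · exact hpn
        · exact hpt y hy
    unfold findLoopA
    split_ifs with h
    · -- early return p + 1
      refine Or.inl ⟨p, ⟨List.mem_cons_self, by omega, ⟨n, by simp, by omega⟩, ?_⟩, rfl, ?_⟩
      · intro hmem
        rcases List.mem_cons.1 hmem with h1 | hmem
        · omega
        · rcases List.mem_cons.1 hmem with h1 | hmem
          · omega
          · have := hnt _ hmem; omega
      · rintro b ⟨hb, _, _, _⟩; exact hall b hb
    · -- recurse: Bspec (n :: t) r, transfer to p :: n :: t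
      have hrec := ih n (List.pairwise_cons.1 hpw).2
      have hc : ∀ a, Cand (p :: n :: t) a ↔ Cand (n :: t) a := by
        intro a
        unfold Cand
        constructor
        · rintro ⟨ha, hpos, ⟨y, hy, hlt⟩, hsucc⟩
          have hy' : y ∈ n :: t := by
            rcases List.mem_cons.1 hy with rfl | hy'
            · exact absurd (hall a ha) (by omega)
            · exact hy'
          have ha' : a ∈ n :: t := by
            rcases List.mem_cons.1 ha with rfl | ha'
            · -- a = p; else branch: ¬(n - 1 > p ∧ p > 0), p > 0, so n ≤ p + 1
              have hn : n ≤ a + 1 := by omega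
              have hne : n ≠ a + 1 := fun he => hsucc (by rw [← he]; simp)
              have : n = a := by omega
              simp [← this]
            · exact ha'
          exact ⟨ha', hpos, ⟨y, hy', hlt⟩, fun hx => hsucc (List.mem_cons_of_mem _ hx)⟩
        · rintro ⟨ha, hpos, ⟨y, hy, hlt⟩, hsucc⟩
          have hna : n ≤ a := by
            rcases List.mem_cons.1 ha with rfl | ha'
            · exact le_refl _
            · exact hnt a ha'
          refine ⟨List.mem_cons_of_mem _ ha, hpos, ⟨y, List.mem_cons_of_mem _ hy, hlt⟩, ?_⟩
          intro hmem
          rcases List.mem_cons.1 hmem with h1 | hmem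
          · omega
          · exact hsucc hmem
      rcases hrec with ⟨a, ha, hr, hmin⟩ | ⟨hnone, m, hm, hmax, hr⟩
      · exact Or.inl ⟨a, (hc a).2 ha, hr, fun b hb => hmin b ((hc b).1 hb)⟩
      · refine Or.inr ⟨fun a ha => hnone a ((hc a).1 ha), m, List.mem_cons_of_mem _ hm, ?_, hr⟩
        intro y hy
        rcases List.mem_cons.1 hy with rfl | hy'
        · have := hall m (List.mem_cons_of_mem _ hm); omega
        · exact hmax y hy'

theorem A_satisfies (input : List Int) (h : input ≠ []) :
    Bspec input (find_int_sorted input) := by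
  unfold find_int_sorted
  have hperm := PySem.List.sorted_perm input (fun x => x) false
  have hmem : ∀ x, x ∈ PySem.List.sorted input (fun x => x) false ↔ x ∈ input :=
    fun x => hperm.mem_iff
  cases hs : PySem.List.sorted input (fun x => x) false with
  | nil => exact absurd ((PySem.List.sorted_eq_nil_iff input (fun x => x) false).1 hs) h
  | cons p rest =>
    have hpw : (p :: rest).Pairwise (· ≤ ·) := by
      have := PySem.List.sorted_pairwise input (fun x => x)
      rwa [hs] at this
    have := loopA_spec rest p hpw
    simp only [hs] at hmem ⊢
    exact Bspec_congr hmem this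

theorem B_satisfies (input : List Int) (h : input ≠ []) :
    Bspec input (find_int_sorted_alt input) := by
  cases hmx : PySem.List.max? input (fun x => x) with
  | none => exact absurd ((PySem.List.max?_eq_none_iff input (fun x => x)).1 hmx) h
  | some mx =>
    have hmxmem : mx ∈ input := PySem.List.max?_mem hmx
    have hmxmax : ∀ y ∈ input, y ≤ mx := fun y hy => PySem.List.max?_isMax hmx y hy
    have hsmem : ∀ x : Int, x ∈ PySem.Set.ofList input ↔ x ∈ input := by
      intro x; simp [PySem.Set.mem_ofList]
    have hcontains : ∀ x : Int, PySem.Set.contains (PySem.Set.ofList input) x = true ↔ x ∈ input := by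
      intro x
      simp [PySem.Set.contains, PySem.Set.mem_ofList]
    have hin : ∀ c, c ∈ ((PySem.Set.ofList input).filter
        (fun a => decide (a > 0) && decide (a < mx) &&
          !(PySem.Set.contains (PySem.Set.ofList input) (a + 1)))).map (fun a => a + 1) ↔
        Cand input (c - 1) := by
      intro c
      simp only [List.mem_map, List.mem_filter, Bool.and_eq_true, Bool.not_eq_true',
        decide_eq_true_eq]
      constructor
      · rintro ⟨a, ⟨has, ⟨hpos, hlt⟩, hnc⟩, rfl⟩
        have ha : a ∈ input := (hsmem a).1 has
        have hsucc : a + 1 ∉ input := by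
          intro hx; rw [← hcontains (a + 1)] at hx; rw [hx] at hnc; cases hnc
        have heq : a + 1 - 1 = a := by omega
        rw [heq]
        exact ⟨ha, hpos, ⟨mx, hmxmem, hlt⟩, hsucc⟩
      · rintro ⟨ha, hpos, ⟨y, hy, hlt⟩, hsucc⟩
        refine ⟨c - 1, ⟨(hsmem _).2 ha, ⟨hpos, ?_⟩, ?_⟩, by omega⟩
        · have := hmxmax y hy; omega
        · rw [Bool.eq_false_iff]
          intro hx
          exact hsucc ((hcontains _).1 hx)
    cases hmn : PySem.List.min? (((PySem.Set.ofList input).filter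
        (fun a => decide (a > 0) && decide (a < mx) &&
          !(PySem.Set.contains (PySem.Set.ofList input) (a + 1)))).map (fun a => a + 1))
        (fun x => x) with
    | none =>
      have hres : find_int_sorted_alt input = mx + 1 := by
        simp only [find_int_sorted_alt, hmx, hmn]
      rw [hres]
      have hnil := (PySem.List.min?_eq_none_iff _ (fun x => x)).1 hmn
      refine Or.inr ⟨?_, mx, hmxmem, hmxmax, rfl⟩
      intro a ha
      have hmem : a + 1 ∈ ((PySem.Set.ofList input).filter
          (fun a => decide (a > 0) && decide (a < mx) &&
            !(PySem.Set.contains (PySem.Set.ofList input) (a + 1)))).map (fun a => a + 1) := by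
        rw [hin (a + 1)]
        have heq : a + 1 - 1 = a := by omega
        rw [heq]; exact ha
      rw [hnil] at hmem
      exact absurd hmem (List.not_mem_nil)
    | some m =>
      have hres : find_int_sorted_alt input = m := by
        simp only [find_int_sorted_alt, hmx, hmn]
      rw [hres]
      have hmmem := PySem.List.min?_mem hmn
      have hmmin : ∀ y, y ∈ ((PySem.Set.ofList input).filter
          (fun a => decide (a > 0) && decide (a < mx) &&
            !(PySem.Set.contains (PySem.Set.ofList input) (a + 1)))).map (fun a => a + 1) → m ≤ y :=
        fun y hy => PySem.List.min?_isMin hmn y hy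
      refine Or.inl ⟨m - 1, (hin m).1 hmmem, by omega, ?_⟩
      intro b hb
      have hmem : b + 1 ∈ ((PySem.Set.ofList input).filter
          (fun a => decide (a > 0) && decide (a < mx) &&
            !(PySem.Set.contains (PySem.Set.ofList input) (a + 1)))).map (fun a => a + 1) := by
        rw [hin (b + 1)]
        have heq : b + 1 - 1 = b := by omega
        rw [heq]; exact hb
      have := hmmin _ hmem; omega

-- ===== VERDICT (by name: the statement is the Claim_ definition above) =====
theorem find_int_sorted_spec : Claim_equal_find_int_sorted := by
  intro input _ hpre
  unfold Spec_find_int_sorted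
  exact Bspec_unique (A_satisfies input hpre) (B_satisfies input hpre)
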